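-- pv_equiv track=rewrite | github.com/zackw/tbbscraper | collector/scripts/country-trace-prefix.py | squeeze_repeats
-- ===== SOURCE A (Python) =====
-- def squeeze_repeats(seq):
--     rv = []
--     prev = None
--     for s in seq:
--         if s != prev:
--             rv.append(s)
--             prev = s
--     rv.reverse()
--     return rv
-- ===== SOURCE B (Python) =====
-- def squeeze_repeats(seq):
--     items = list(seq)
--     out = []
--     i = len(items) - 1
--     while i >= 0:
--         v = items[i]
--         out.append(v)
--         while i >= 0 and items[i] == v:
--             i -= 1
--     return out
-- ===== Notes on version B (the rewrite author's own statement) =====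
-- stated objective: alternative
-- what changed: B scans the materialized input back-to-front with an index pointer that detects whole runs and jumps over each run in an inner loop, emitting one representative per run directly in final (reversed) order, instead of A's per-element prev-state filter followed by a reverse pass.
import Mathlib
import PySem

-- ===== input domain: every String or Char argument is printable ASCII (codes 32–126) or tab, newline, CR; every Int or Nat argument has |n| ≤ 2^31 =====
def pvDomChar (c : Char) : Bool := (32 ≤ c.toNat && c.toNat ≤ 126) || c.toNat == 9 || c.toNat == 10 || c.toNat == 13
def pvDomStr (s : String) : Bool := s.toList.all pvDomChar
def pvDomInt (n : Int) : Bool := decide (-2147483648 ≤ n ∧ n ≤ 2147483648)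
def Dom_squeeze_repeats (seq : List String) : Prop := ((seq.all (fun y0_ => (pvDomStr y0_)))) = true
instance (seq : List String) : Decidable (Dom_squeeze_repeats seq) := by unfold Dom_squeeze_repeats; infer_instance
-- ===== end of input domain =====

-- B walks the input back-to-front with an index pointer, skipping whole runs and emitting
-- one representative per run already in final order (no trailing reverse): alternative decomposition.

-- ===== PORT A =====
-- A's loop state: (rv, prev); prev starts as None (Option String).
def squeezeStepA (st : List String × Option String) (s : String) : List String × Option String :=
  if some s ≠ st.2 then (st.1 ++ [s], some s) else st

def squeeze_repeats (seq : List String) : List String :=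
  (seq.foldl squeezeStepA ([], none)).1.reverse

-- ===== PORT B =====
-- B's inner while loop: starting just below index n (i.e. at index n-1), decrement the index
-- while the element equals v; returns (final index)+1.  Indices read are always in range,
-- so List.getD is exact here.
def skipRun (items : List String) (v : String) : Nat → Nat
  | 0 => 0
  | n+1 => if items.getD n "" = v then skipRun items v n else n+1

theorem skipRun_le (items : List String) (v : String) : ∀ n, skipRun items v n ≤ n := by
  intro n
  induction n with
  | zero => simp [skipRun]
  | succ k ih =>
    simp only [skipRun]
    split
    · exact Nat.le_succ_of_le ih
    · exact Nat.le_refl _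

-- B's outer while loop; n = (current index)+1, out is the accumulator.
def outerLoop (items : List String) (out : List String) : Nat → List String
  | 0 => out
  | n+1 =>
    let v := items.getD n ""
    -- inner loop starts at index n; items[n] = v, so the first test succeeds and it
    -- continues as skipRun from n
    outerLoop items (out ++ [v]) (skipRun items v n)
termination_by n => n
decreasing_by exact Nat.lt_succ_of_le (skipRun_le items _ n)

def squeeze_repeats_alt (seq : List String) : List String :=
  outerLoop seq [] seq.length

-- ===== PRECONDITION & SPEC =====
def Spec_squeeze_repeats (seq : List String) (out : List String) : Prop := out = squeeze_repeats_alt seq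
instance (seq : List String) (out : List String) : Decidable (Spec_squeeze_repeats seq out) := by unfold Spec_squeeze_repeats; infer_instance

-- ===== CLAIM (what is proved, stated in full; the proofs are below) =====
def Claim_equal_squeeze_repeats : Prop := ∀ (seq : List String), Dom_squeeze_repeats seq → Spec_squeeze_repeats seq (squeeze_repeats seq)

-- ===== LEMMAS AND PROOFS =====

-- Functional form of A's collapse loop: prev = p, remaining input = l.
def collapse (p : Option String) : List String → List String
  | [] => []
  | s :: t => if some s = p then collapse p t else s :: collapse (some s) t

theorem foldlA_eq_collapse (l : List String) (rv : List String) (p : Option String) :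
    (l.foldl squeezeStepA (rv, p)).1 = rv ++ collapse p l := by
  induction l generalizing rv p with
  | nil => simp [collapse]
  | cons s t ih =>
    simp only [List.foldl_cons, squeezeStepA, collapse]
    by_cases h : some s = p
    · simp [h, ih]
    · simp [h, ih]

-- duplicating the last element does not change the collapse
theorem collapse_dup_last (L : List String) (p : Option String) (a : String) :
    collapse p (L ++ [a, a]) = collapse p (L ++ [a]) := by
  induction L generalizing p with
  | nil =>
    by_cases h : some a = p <;> simp [collapse, h]
  | cons s t ih =>
    by_cases h : some s = p <;> simp [collapse, h, ih]

-- appending a fresh element after a kept last element appends it to the collapse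
theorem collapse_snoc_ne (L : List String) (p : Option String) (b a : String) (hab : b ≠ a) :
    collapse p (L ++ [b, a]) = collapse p (L ++ [b]) ++ [a] := by
  induction L generalizing p with
  | nil =>
    by_cases h : some b = p
    · subst h; simp [collapse, Ne.symm hab]
    · simp [collapse, h, Ne.symm hab]
  | cons s t ih =>
    by_cases h : some s = p <;> simp [collapse, h, ih]

-- reversing the collapse (continued after a) = collapsing the reverse ending in a
theorem collapse_reverse_aux (l : List String) (a : String) :
    (collapse (some a) l).reverse ++ [a] = collapse none (l.reverse ++ [a]) := by
  induction l generalizing a with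
  | nil => simp [collapse]
  | cons s t ih =>
    by_cases h : s = a
    · subst h
      have heq : collapse (some s) (s :: t) = collapse (some s) t := by
        simp [collapse]
      rw [heq, ih s, List.reverse_cons, List.append_assoc]
      exact (collapse_dup_last t.reverse none s).symm
    · have heq : collapse (some a) (s :: t) = s :: collapse (some s) t := by
        simp [collapse, h]
      rw [heq, List.reverse_cons, List.reverse_cons,
        show (t.reverse ++ [s]) ++ [a] = t.reverse ++ [s, a] by simp,
        collapse_snoc_ne t.reverse none s a h, ih s]

theorem collapse_reverse (l : List String) :
    (collapse none l).reverse = collapse none l.reverse := by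
  cases l with
  | nil => simp [collapse]
  | cons s t =>
    simp only [collapse, List.reverse_cons]
    rw [if_neg (by simp), List.reverse_cons]
    exact collapse_reverse_aux t s

-- take (n+1) reversed = items[n] :: take n reversed  (n in range)
theorem take_succ_reverse (items : List String) (n : Nat) (hn : n < items.length) :
    (items.take (n+1)).reverse = items.getD n "" :: (items.take n).reverse := by
  rw [List.take_add_one, List.getElem?_eq_getElem hn]
  simp [List.getD, List.getElem?_eq_getElem hn]

-- the inner skip loop realizes collapse's consumption of a leading run
theorem collapse_skip (items : List String) (v : String) :
    ∀ k, k ≤ items.length →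
      collapse (some v) ((items.take k).reverse)
        = collapse none ((items.take (skipRun items v k)).reverse) := by
  intro k
  induction k with
  | zero => intro _; simp [skipRun, collapse]
  | succ n ih =>
    intro h
    have hn : n < items.length := h
    rw [take_succ_reverse items n hn]
    simp only [skipRun]
    by_cases hv : items.getD n "" = v
    · rw [if_pos hv, collapse, if_pos (by rw [hv]), ih (Nat.le_of_lt hn)]
    · rw [if_neg hv, take_succ_reverse items n hn]
      rw [collapse, if_neg (by simpa using hv), collapse, if_neg (by simp)]

-- the outer loop computes the collapse of the reversed prefix, appended to the accumulator
theorem outerLoop_eq (items : List String) :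
    ∀ n, n ≤ items.length → ∀ out,
      outerLoop items out n = out ++ collapse none ((items.take n).reverse) := by
  intro n
  induction n using Nat.strong_induction_on with
  | _ n ih =>
    match n with
    | 0 => intro _ out; simp [outerLoop, collapse]
    | Nat.succ m =>
      intro h out
      have hm : m < items.length := h
      rw [outerLoop]
      have hskip : skipRun items (items.getD m "") m ≤ m := skipRun_le items _ m
      rw [ih _ (Nat.lt_succ_of_le hskip) (Nat.le_trans hskip (Nat.le_of_lt hm)) _]
      rw [take_succ_reverse items m hm, collapse, if_neg (by simp)]
      have := collapse_skip items (items.getD m "") m (Nat.le_of_lt hm)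
      rw [← this]
      simp

-- ===== VERDICT (by name: the statement is the Claim_ definition above) =====
theorem squeeze_repeats_spec : Claim_equal_squeeze_repeats := by
  intro seq _
  unfold Spec_squeeze_repeats squeeze_repeats squeeze_repeats_alt
  rw [foldlA_eq_collapse, outerLoop_eq seq seq.length (Nat.le_refl _) [],
    List.take_length]
  simpa using collapse_reverse seq
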